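-- pv_equiv track=rewrite | github.com/Lidorpahima/Python-Practice-Functions | CollectionQuestions.py | correctNumberHealper
-- ===== SOURCE A (Python) =====
-- def correctNumberHealper(num): # this helper function will check if the number is correct
--     count = 0
--     copyNum = num
--     while (copyNum > 0): # count the digits so we will know how to calculate the values
--         count+=1
--         copyNum = copyNum // 10
--     if (count != 3): # check if the number is not 3 digits
--         return False
--     firstNum = num % 10 # save the first digit
--     num = num // 10
--     secondNum = num % 10 # save the second digit
--     num = num // 10
--     thirdNum = num % 10 # save the third digit
--     if((firstNum % 2 == 0 and secondNum % 2 == 0 and thirdNum % 2 == 0) or (firstNum %2 == 1 and secondNum % 2 == 1 and thirdNum % 2 == 1)): # check if all the digits are even or all the digits are odd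
--         return True
--     else:
--         return False
-- ===== SOURCE B (Python) =====
-- def correctNumberHealper(num):
--     # B: direct range guard plus "all digits share one parity" via a parity set.
--     if not (100 <= num <= 999):
--         return False
--     return len({int(d) % 2 for d in str(num)}) == 1
-- ===== Notes on version B (the rewrite author's own statement) =====
-- stated objective: simpler
-- what changed: Replaced the digit-counting while-loop and explicit three-digit extraction/parity and-or chain with a numeric range guard (100 <= num <= 999) and a one-line set comprehension of digit parities over str(num).
import Mathlib
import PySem

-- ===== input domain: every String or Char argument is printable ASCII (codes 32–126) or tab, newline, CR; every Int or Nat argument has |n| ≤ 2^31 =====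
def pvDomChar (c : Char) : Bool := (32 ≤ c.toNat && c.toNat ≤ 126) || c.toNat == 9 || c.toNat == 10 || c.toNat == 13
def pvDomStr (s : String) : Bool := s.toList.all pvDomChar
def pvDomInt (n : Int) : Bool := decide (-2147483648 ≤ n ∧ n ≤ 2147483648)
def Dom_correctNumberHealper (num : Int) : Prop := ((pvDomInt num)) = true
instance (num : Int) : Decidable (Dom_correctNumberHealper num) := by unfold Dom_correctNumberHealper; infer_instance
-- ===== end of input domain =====

-- B replaces A's digit-count loop + per-digit parity chain by a range guard and a parity set; objective: simpler.

-- ===== PORT A =====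
-- A's while-loop counting digits; fuel (num.toNat + 1) only makes the loop total,
-- it always suffices since copyNum strictly decreases while positive.
def cdGo : Nat → Int → Nat
  | 0, _ => 0
  | f+1, m => if 0 < m then cdGo f (PySem.Int.floordiv m 10) + 1 else 0

def correctNumberHealper (num : Int) : Bool :=
  let count := cdGo (num.toNat + 1) num
  if count ≠ 3 then false
  else
    let firstNum := PySem.Int.mod num 10
    let num1 := PySem.Int.floordiv num 10
    let secondNum := PySem.Int.mod num1 10
    let num2 := PySem.Int.floordiv num1 10
    let thirdNum := PySem.Int.mod num2 10
    if (PySem.Int.mod firstNum 2 = 0 ∧ PySem.Int.mod secondNum 2 = 0 ∧ PySem.Int.mod thirdNum 2 = 0) ∨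
       (PySem.Int.mod firstNum 2 = 1 ∧ PySem.Int.mod secondNum 2 = 1 ∧ PySem.Int.mod thirdNum 2 = 1) then true
    else false

-- ===== PORT B =====
-- int(d): under the range guard every character of str(num) is a digit, so ofChars? is
-- always some; getD 0 is unreachable and only discharges the Option.
def correctNumberHealper_alt (num : Int) : Bool :=
  if ¬ (100 ≤ num ∧ num ≤ 999) then false
  else
    let parities : PySem.Set Int :=
      PySem.Set.ofList ((PySem.Int.toChars num).map
        (fun d => PySem.Int.mod ((PySem.Int.ofChars? [d]).getD 0) 2))
    PySem.Set.len parities == 1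

-- ===== PRECONDITION & SPEC =====
def Spec_correctNumberHealper (num : Int) (out : Bool) : Prop := out = correctNumberHealper_alt num
instance (num : Int) (out : Bool) : Decidable (Spec_correctNumberHealper num out) := by unfold Spec_correctNumberHealper; infer_instance

-- ===== CLAIM (what is proved, stated in full; the proofs are below) =====
def Claim_equal_correctNumberHealper : Prop := ∀ (num : Int), Dom_correctNumberHealper num → Spec_correctNumberHealper num (correctNumberHealper num)

-- ===== LEMMAS AND PROOFS =====

theorem cdGo_nonpos (f : Nat) (m : Int) (h : m ≤ 0) : cdGo f m = 0 := by
  cases f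
  · simp [cdGo]
  · simp [cdGo]; omega

theorem cdGo_step (f : Nat) (m : Int) (h0 : 0 < m) (hf : 0 < f) :
    cdGo f m = cdGo (f-1) (m / 10) + 1 := by
  cases f with
  | zero => omega
  | succ f =>
    simp only [cdGo, if_pos h0, Nat.add_sub_cancel,
      PySem.Int.floordiv_eq_ediv_of_pos (show (0:Int) < 10 by norm_num)]

theorem cdGo_ge1 (f : Nat) (m : Int) (h : 1 ≤ m) (hf : 0 < f) : 1 ≤ cdGo f m := by
  rw [cdGo_step f m (by omega) hf]; omega

theorem cdGo_ge4 (f : Nat) (m : Int) (h : 1000 ≤ m) (hf : 4 ≤ f) : 4 ≤ cdGo f m := by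
  rw [cdGo_step f m (by omega) (by omega),
      cdGo_step (f-1) (m/10) (by omega) (by omega),
      cdGo_step (f-1-1) (m/10/10) (by omega) (by omega)]
  have := cdGo_ge1 (f-1-1-1) (m/10/10/10) (by omega) (by omega)
  omega

theorem cdGo_count_lt3 (m : Int) (f : Nat) (h1 : 1 ≤ m) (h2 : m ≤ 99) (hf : 2 ≤ f) :
    cdGo f m ≤ 2 := by
  rw [cdGo_step f m (by omega) (by omega)]
  rcases (show m / 10 = 0 ∨ 1 ≤ m / 10 by omega) with h | h
  · rw [h, cdGo_nonpos _ 0 (by omega)]; omega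
  · rw [cdGo_step (f-1) (m/10) (by omega) (by omega),
        show m/10/10 = 0 by omega, cdGo_nonpos _ 0 (by omega)]

set_option maxRecDepth 10000 in
theorem allEq900 : (List.range 900).all
    (fun k => correctNumberHealper (100 + (k : Int)) == correctNumberHealper_alt (100 + (k : Int))) = true := by
  decide

-- ===== VERDICT (by name: the statement is the Claim_ definition above) =====
theorem correctNumberHealper_spec : Claim_equal_correctNumberHealper := by
  intro num _
  unfold Spec_correctNumberHealper
  rcases (show num ≤ 0 ∨ (1 ≤ num ∧ num ≤ 99) ∨ (100 ≤ num ∧ num ≤ 999) ∨ 1000 ≤ num by omega)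
    with h | ⟨h1, h2⟩ | ⟨h1, h2⟩ | h
  · have hA : correctNumberHealper num = false := by
      simp [correctNumberHealper, cdGo_nonpos _ _ h]
    have hB : correctNumberHealper_alt num = false := by
      simp [correctNumberHealper_alt]; omega
    rw [hA, hB]
  · have hc := cdGo_count_lt3 num (num.toNat + 1) h1 h2 (by omega)
    have hA : correctNumberHealper num = false := by
      simp [correctNumberHealper]; omega
    have hB : correctNumberHealper_alt num = false := by
      simp [correctNumberHealper_alt]; omega
    rw [hA, hB]
  · have hk : num = 100 + ((num - 100).toNat : Int) := by omega
    have hmem : (num - 100).toNat ∈ List.range 900 := by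
      rw [List.mem_range]; omega
    have := List.all_eq_true.mp allEq900 _ hmem
    rw [hk]
    exact of_decide_eq_true this
  · have hc := cdGo_ge4 (num.toNat + 1) num h (by omega)
    have hA : correctNumberHealper num = false := by
      simp [correctNumberHealper]; omega
    have hB : correctNumberHealper_alt num = false := by
      simp [correctNumberHealper_alt]; omega
    rw [hA, hB]
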